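-- pv_equiv track=rewrite | github.com/berlino/seq_icl | baum_welch.py | possible_states
-- ===== SOURCE A (Python) =====
-- def possible_states(t: int, max_states: int = 20):
--     """
--     Return the possible states at time t.
--
--     Args:
--         t (int): Time step.
--
--     Returns:
--         states (list): List of possible states.
--     """
--     if t == 0:
--         return [0]
--     elif t == 1:
--         return [1]
--     else:
--         current_states = possible_states(t - 1, max_states=max_states)
--         next_state = max(current_states) + 1
--         if next_state < max_states:
--             current_states.append(next_state)
--         if 0 not in current_states:
--             current_states.append(0)
--         return current_states
-- ===== SOURCE B (Python) =====
-- def possible_states(t: int, max_states: int = 20):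
--     """Closed-form construction of the possible-states list (no recursion)."""
--     if t == 0:
--         return [0]
--     if t == 1:
--         return [1]
--     k = min(t, max_states - 1)
--     if k < 2:
--         return [1, 0]
--     return [1, 2, 0] + list(range(3, k + 1))
-- ===== Notes on version B (the rewrite author's own statement) =====
-- stated objective: faster
-- what changed: Replaced A's recursion over all t time steps (each rescanning the growing list with max and a membership test) by a direct closed-form construction [1,2,0,3,...,min(t,max_states-1)] (with [1,0] when max_states<=2).
import Mathlib
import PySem

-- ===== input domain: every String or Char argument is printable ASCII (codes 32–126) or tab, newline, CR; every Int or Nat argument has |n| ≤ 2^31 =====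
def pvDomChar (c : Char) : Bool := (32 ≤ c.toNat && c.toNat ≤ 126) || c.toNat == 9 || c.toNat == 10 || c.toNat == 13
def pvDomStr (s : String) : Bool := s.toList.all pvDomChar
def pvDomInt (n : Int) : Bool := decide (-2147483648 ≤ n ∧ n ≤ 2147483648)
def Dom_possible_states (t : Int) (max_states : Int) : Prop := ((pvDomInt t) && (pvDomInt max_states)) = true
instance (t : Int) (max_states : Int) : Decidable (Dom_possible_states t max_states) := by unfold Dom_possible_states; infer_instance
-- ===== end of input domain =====

-- B replaces A's recursion over all t time steps by a direct closed-form construction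
-- of [1, 2, 0, 3, ..., min(t, max_states-1)] (objective: faster, asymptotically).


-- ===== PORT A =====
-- A's recursion on t, with the (nonnegative, Pre_-guaranteed) t as the Nat recursion depth.
-- max(current_states) → PySem.List.max? with identity key; the list is never empty, so the
-- `.getD 0` default is never taken.
def possibleStatesGoA : Nat → Int → List Int
  | 0, _ => [0]
  | 1, _ => [1]
  | (n+2), max_states =>
    let current_states := possibleStatesGoA (n+1) max_states
    let next_state := (PySem.List.max? current_states (fun x => x)).getD 0 + 1
    let current_states := if next_state < max_states then current_states ++ [next_state] else current_states
    if (0 : Int) ∈ current_states then current_states else current_states ++ [0]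

def possible_states (t : Int) (max_states : Int) : List Int :=
  possibleStatesGoA t.toNat max_states

-- ===== PORT B =====
def possible_states_alt (t : Int) (max_states : Int) : List Int :=
  if t = 0 then [0]
  else if t = 1 then [1]
  else
    let k := min t (max_states - 1)
    if k < 2 then [1, 0]
    else [1, 2, 0] ++ PySem.List.pyRange 3 (k + 1) 1

-- ===== PRECONDITION & SPEC =====
-- Pre_ excludes t < 0, on which A recurses without a base case (RecursionError).
def Pre_possible_states (t : Int) (max_states : Int) : Prop := 0 ≤ t
instance (t : Int) (max_states : Int) : Decidable (Pre_possible_states t max_states) := by unfold Pre_possible_states; infer_instance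
def pvWitness_possible_states : Int × Int := (5, 20)

def Spec_possible_states (t : Int) (max_states : Int) (out : List Int) : Prop := out = possible_states_alt t max_states
instance (t : Int) (max_states : Int) (out : List Int) : Decidable (Spec_possible_states t max_states out) := by unfold Spec_possible_states; infer_instance

-- ===== CLAIM (what is proved, stated in full; the proofs are below) =====
def Claim_equal_possible_states : Prop := ∀ (t : Int) (max_states : Int), Dom_possible_states t max_states → Pre_possible_states t max_states → Spec_possible_states t max_states (possible_states t max_states)

-- ===== LEMMAS AND PROOFS =====

-- max(current_states) of the closed-form list [1,2,0,...,k] is k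
lemma fold_max_range (m : Int) (hm : 2 ≤ m) :
    List.foldl max 2 (PySem.List.pyRange 3 (m + 1) 1) = m := by
  induction m, hm using Int.le_induction with
  | base => simp
  | succ m hm ih =>
    rw [show m + 1 + 1 = (m + 1) + 1 from rfl,
        PySem.List.pyRange_one_succ_right (by omega : (3:Int) ≤ m + 1)]
    rw [List.foldl_append, ih]
    simp

lemma max_closed (k : Int) (hk : 2 ≤ k) :
    PySem.List.max? ([1, 2, 0] ++ PySem.List.pyRange 3 (k + 1) 1) (fun x => x) = some k := by
  rw [show ([1, 2, 0] ++ PySem.List.pyRange 3 (k + 1) 1 : List Int)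
        = 1 :: ([2, 0] ++ PySem.List.pyRange 3 (k + 1) 1) from rfl,
      PySem.List.max?_id_cons]
  rw [List.foldl_append]
  norm_num
  exact fold_max_range k hk

lemma goA_closed (max_states : Int) (n : Nat) (hn : 2 ≤ n) :
    possibleStatesGoA n max_states =
      (if min (n : Int) (max_states - 1) < 2 then [1, 0]
       else [1, 2, 0] ++ PySem.List.pyRange 3 (min (n : Int) (max_states - 1) + 1) 1) := by
  induction n with
  | zero => omega
  | succ n ih =>
    rcases Nat.lt_or_ge n 2 with h2 | h2
    · have hn2 : n = 1 := by omega
      subst hn2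
      norm_num
      show possibleStatesGoA 2 max_states = _
      unfold possibleStatesGoA
      have hmax : PySem.List.max? [(1:Int)] (fun x => x) = some 1 := by
        rw [show [(1:Int)] = 1 :: ([] : List Int) from rfl, PySem.List.max?_id_cons]; rfl
      rw [show possibleStatesGoA 1 max_states = [1] from rfl]
      simp only [hmax, Option.getD_some]
      by_cases hms : (1:Int) + 1 < max_states
      · norm_num [show (2:Int) < max_states by omega, show ¬ max_states ≤ 2 by omega]
      · norm_num [show ¬ (2:Int) < max_states by omega, show max_states ≤ 2 by omega]
    · have hcur := ih h2
      have hsucc : possibleStatesGoA (n + 1) max_states =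
          (let current_states := possibleStatesGoA n max_states
           let next_state := (PySem.List.max? current_states (fun x => x)).getD 0 + 1
           let current_states := if next_state < max_states then current_states ++ [next_state] else current_states
           if (0 : Int) ∈ current_states then current_states else current_states ++ [0]) := by
        conv_lhs => rw [show n + 1 = (n - 1) + 2 by omega]
        rw [possibleStatesGoA]
        rw [show n - 1 + 1 = n by omega]
      rw [hsucc]
      push_cast
      by_cases hms : max_states ≤ 2
      · have hmin : min ((n:Int)) (max_states - 1) < 2 := by omega
        rw [hcur, if_pos hmin]
        have hmax : PySem.List.max? [(1:Int), 0] (fun x => x) = some 1 := by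
          rw [show [(1:Int), 0] = 1 :: [(0:Int)] from rfl, PySem.List.max?_id_cons]; rfl
        simp only [hmax, Option.getD_some]
        rw [if_neg (by omega : ¬ (1:Int) + 1 < max_states)]
        rw [if_pos (by omega : min ((n:Int) + 1) (max_states - 1) < 2)]
        simp
      · set k : Int := min ((n:Int)) (max_states - 1) with hk
        have hk2 : 2 ≤ k := by omega
        rw [hcur, if_neg (by omega : ¬ k < 2)]
        simp only [max_closed k hk2, Option.getD_some]
        by_cases hnext : k + 1 < max_states
        · have hmin' : min ((n:Int) + 1) (max_states - 1) = k + 1 := by omega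
          rw [if_pos hnext]
          rw [List.append_assoc, ← PySem.List.pyRange_one_succ_right (by omega : (3:Int) ≤ k + 1)]
          rw [if_pos (by simp : (0 : Int) ∈ ([1, 2, 0] ++ PySem.List.pyRange 3 (k + 1 + 1) 1))]
          rw [hmin', if_neg (by omega : ¬ k + 1 < 2)]
        · have hmin' : min ((n:Int) + 1) (max_states - 1) = k := by omega
          rw [if_neg hnext]
          rw [if_pos (by simp : (0 : Int) ∈ ([1, 2, 0] ++ PySem.List.pyRange 3 (k + 1) 1))]
          rw [hmin', if_neg (by omega : ¬ k < 2)]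

-- ===== VERDICT (by name: the statement is the Claim_ definition above) =====
theorem possible_states_spec : Claim_equal_possible_states := by
  intro t max_states _ hpre
  unfold Spec_possible_states possible_states possible_states_alt
  by_cases h0 : t = 0
  · subst h0; rfl
  · by_cases h1 : t = 1
    · subst h1; rfl
    · have h2 : 2 ≤ t := by unfold Pre_possible_states at hpre; omega
      have hnat : ((t.toNat : Int)) = t := Int.toNat_of_nonneg (by omega)
      have hn2 : 2 ≤ t.toNat := by omega
      rw [goA_closed max_states t.toNat hn2, hnat, if_neg h0, if_neg h1]
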